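-- pv_equiv track=rewrite | github.com/dimkadiver-cpu/TRADING_BOT_TELEGRAM | src/parser/normalization.py | _derive_primary_intent
-- ===== SOURCE A (Python) =====
-- def _derive_primary_intent(intents: list[str]) -> str | None:
--     for intent in intents:
--         if isinstance(intent, str) and intent.startswith("NS_"):
--             return intent
--     for intent in intents:
--         if isinstance(intent, str) and intent.startswith("U_"):
--             return intent
--     for intent in intents:
--         if isinstance(intent, str) and intent.strip():
--             return intent
--     return None
-- ===== SOURCE B (Python) =====
-- def _derive_primary_intent(intents: list[str]) -> str | None:
--     first_u = None
--     first_nonempty = None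
--     for intent in intents:
--         if not isinstance(intent, str):
--             continue
--         if intent.startswith("NS_"):
--             return intent
--         if first_u is None and intent.startswith("U_"):
--             first_u = intent
--         if first_nonempty is None and intent.strip():
--             first_nonempty = intent
--     return first_u if first_u is not None else first_nonempty
-- ===== Notes on version B (the rewrite author's own statement) =====
-- stated objective: simpler
-- what changed: Replaced A's three separate scans over the list by a single pass that returns an NS_ element immediately and tracks the first U_ element and first non-blank element in two slots, preferring the U_ slot at the end.
import Mathlib
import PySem

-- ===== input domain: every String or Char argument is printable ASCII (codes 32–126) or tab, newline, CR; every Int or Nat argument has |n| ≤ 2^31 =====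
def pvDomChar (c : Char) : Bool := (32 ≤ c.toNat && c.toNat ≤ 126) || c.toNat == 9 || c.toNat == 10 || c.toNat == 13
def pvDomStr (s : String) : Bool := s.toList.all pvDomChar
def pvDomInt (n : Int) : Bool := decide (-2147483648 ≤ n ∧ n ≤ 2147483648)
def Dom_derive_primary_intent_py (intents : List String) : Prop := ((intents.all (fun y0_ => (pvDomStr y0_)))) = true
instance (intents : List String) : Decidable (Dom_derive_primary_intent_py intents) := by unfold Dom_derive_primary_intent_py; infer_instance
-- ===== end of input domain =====

-- B collapses A's three scans into one pass with two candidate slots; objective: simpler.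


-- ===== PORT A =====
-- first loop: return first element starting with "NS_"
def pvScanNS : List String → Option String
  | [] => none
  | x :: xs => if PySem.Str.startswith x "NS_" then some x else pvScanNS xs

-- second loop: return first element starting with "U_"
def pvScanU : List String → Option String
  | [] => none
  | x :: xs => if PySem.Str.startswith x "U_" then some x else pvScanU xs

-- third loop: return first element whose strip() is truthy (non-empty)
def pvScanNE : List String → Option String
  | [] => none
  | x :: xs => if PySem.Str.strip x ≠ "" then some x else pvScanNE xs

def derive_primary_intent_py (intents : List String) : Option String :=
  match pvScanNS intents with
  | some i => some i
  | none =>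
    match pvScanU intents with
    | some i => some i
    | none => pvScanNE intents

-- ===== PORT B =====
-- single pass: early return on "NS_", two write-once slots for first "U_" and first non-blank
def pvOnePass : List String → Option String → Option String → Option String
  | [], firstU, firstNE => match firstU with | some u => some u | none => firstNE
  | x :: xs, firstU, firstNE =>
    if PySem.Str.startswith x "NS_" then some x
    else
      pvOnePass xs
        (if firstU = none ∧ PySem.Str.startswith x "U_" then some x else firstU)
        (if firstNE = none ∧ PySem.Str.strip x ≠ "" then some x else firstNE)

def derive_primary_intent_py_alt (intents : List String) : Option String :=
  pvOnePass intents none none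

-- ===== PRECONDITION & SPEC =====
def Spec_derive_primary_intent_py (intents : List String) (out : Option String) : Prop := out = derive_primary_intent_py_alt intents
instance (intents : List String) (out : Option String) : Decidable (Spec_derive_primary_intent_py intents out) := by unfold Spec_derive_primary_intent_py; infer_instance

-- ===== CLAIM (what is proved, stated in full; the proofs are below) =====
def Claim_equal_derive_primary_intent_py : Prop := ∀ (intents : List String), Dom_derive_primary_intent_py intents → Spec_derive_primary_intent_py intents (derive_primary_intent_py intents)

-- ===== LEMMAS AND PROOFS =====

-- invariant of B's single pass in terms of A's three scans and the two slots
theorem pvOnePass_eq (xs : List String) : ∀ (u ne : Option String),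
    pvOnePass xs u ne =
      match pvScanNS xs with
      | some i => some i
      | none =>
        match (match u with | some v => some v | none => pvScanU xs) with
        | some i => some i
        | none => match ne with | some v => some v | none => pvScanNE xs := by
  induction xs with
  | nil => intro u ne; cases u <;> cases ne <;> simp [pvOnePass, pvScanNS, pvScanU, pvScanNE]
  | cons x xs ih =>
    intro u ne
    by_cases hNS : PySem.Chars.startswith x.toList ['N', 'S', '_'] = true
    · simp [pvOnePass, pvScanNS, hNS]
    · by_cases hU : PySem.Chars.startswith x.toList ['U', '_'] = true <;>
        by_cases hNE : PySem.Str.strip x = "" <;>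
        cases u <;> cases ne <;>
        simp [pvOnePass, pvScanNS, pvScanU, pvScanNE, ih, hNS, hU, hNE]

-- ===== VERDICT (by name: the statement is the Claim_ definition above) =====
theorem derive_primary_intent_py_spec : Claim_equal_derive_primary_intent_py := by
  intro intents _
  unfold Spec_derive_primary_intent_py derive_primary_intent_py derive_primary_intent_py_alt
  rw [pvOnePass_eq]
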